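-- pv_equiv track=rewrite | github.com/Maebara-K7/mahjong-tournament-calculator | cond_lib.py | list_all_possible_tenpai_cases
-- ===== SOURCE A (Python) =====
-- from itertools import product
--
-- def list_all_possible_tenpai_cases(riichi_status):
--     # 立直玩家一定听牌
--     # 立直状态为0的玩家听牌状态不确定，需枚举
--
--     tenpai_options = []
--     for i in range(4):
--         if riichi_status[i] == 1:
--             # 立直玩家必听牌
--             tenpai_options.append([1])
--         else:
--             # 其他玩家可能听牌也可能不听牌
--             tenpai_options.append([0, 1])
--
--     # 枚举所有可能的听牌组合
--     all_cases = list(product(*tenpai_options))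
--     return all_cases
-- ===== SOURCE B (Python) =====
-- def list_all_possible_tenpai_cases(riichi_status):
--     # Indices of non-riichi players (tenpai undetermined); riichi players are fixed to 1.
--     free = [i for i in range(4) if riichi_status[i] != 1]
--     k = len(free)
--     all_cases = []
--     for n in range(2 ** k):
--         case = [1, 1, 1, 1]
--         for j, i in enumerate(free):
--             # first free player is the most significant bit
--             case[i] = (n // 2 ** (k - 1 - j)) % 2
--         all_cases.append(tuple(case))
--     return all_cases
-- ===== Notes on version B (the rewrite author's own statement) =====
-- stated objective: alternative
-- what changed: Replaces per-player option lists and the itertools.product cartesian expansion with a single counter loop over range(2**len(free)) that decodes each index's bits into the free (non-riichi) positions, the first free player being the most significant bit.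
import Mathlib
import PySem

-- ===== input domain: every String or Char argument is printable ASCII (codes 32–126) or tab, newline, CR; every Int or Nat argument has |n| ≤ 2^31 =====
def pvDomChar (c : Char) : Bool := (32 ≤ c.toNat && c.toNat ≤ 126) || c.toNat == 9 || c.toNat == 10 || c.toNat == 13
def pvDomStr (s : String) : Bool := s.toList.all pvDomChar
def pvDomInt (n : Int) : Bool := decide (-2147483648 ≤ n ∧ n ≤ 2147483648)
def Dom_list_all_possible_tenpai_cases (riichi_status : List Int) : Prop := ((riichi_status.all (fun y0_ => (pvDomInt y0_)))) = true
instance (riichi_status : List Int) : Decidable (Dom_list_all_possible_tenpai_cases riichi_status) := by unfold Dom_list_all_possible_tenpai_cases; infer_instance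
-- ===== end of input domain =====

-- B replaces the per-player option lists and the itertools.product cartesian expansion by a single
-- counter loop over range(2**len(free)) whose bits are decoded into the free (non-riichi) positions
-- (objective: alternative decomposition; same output, same cost).

-- ===== PORT A =====
def list_all_possible_tenpai_cases (riichi_status : List Int) : List (Int × Int × Int × Int) :=
  let tenpai_options : List (List Int) :=
    (PySem.List.pyRange 0 4 1).foldl
      (fun acc i =>
        if PySem.List.pyGetD riichi_status i 0 = 1 then acc ++ [[1]] else acc ++ [[0, 1]]) []
  -- itertools.product over the 4 option lists (rightmost varies fastest), ported by hand; exact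
  -- because tenpai_options always has exactly 4 entries.
  let o0 := tenpai_options.getD 0 []
  let o1 := tenpai_options.getD 1 []
  let o2 := tenpai_options.getD 2 []
  let o3 := tenpai_options.getD 3 []
  o0.flatMap fun a => o1.flatMap fun b => o2.flatMap fun c => o3.map fun d => (a, b, c, d)

-- ===== PORT B =====
-- [a,b,c,d] → (a,b,c,d); B's tuple(case) on the length-4 working list
def pvTuple4 (case : List Int) : Int × Int × Int × Int :=
  (case.getD 0 0, case.getD 1 0, case.getD 2 0, case.getD 3 0)

def list_all_possible_tenpai_cases_alt (riichi_status : List Int) : List (Int × Int × Int × Int) :=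
  let free : List Int :=
    (PySem.List.pyRange 0 4 1).filter (fun i => ¬ PySem.List.pyGetD riichi_status i 0 = 1)
  let k : Nat := free.length
  (PySem.List.pyRange 0 ((2 : Int) ^ k) 1).foldl
    (fun all_cases n =>
      let case : List Int :=
        (PySem.List.enumerate free).foldl
          (fun c ji =>
            -- (n // 2 ** (k - 1 - j)) % 2 ; the exponent is a nonnegative int (j < k), so .toNat is exact
            PySem.List.pySetD c ji.2
              (PySem.Int.mod (PySem.Int.floordiv n ((2 : Int) ^ (((k : Int) - 1 - ji.1).toNat))) 2))
          [1, 1, 1, 1]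
      all_cases ++ [pvTuple4 case]) []

-- ===== PRECONDITION & SPEC =====
-- A (and B) raise IndexError when the list has fewer than 4 entries; Pre_ excludes exactly that.
def Pre_list_all_possible_tenpai_cases (riichi_status : List Int) : Prop := 4 ≤ riichi_status.length
instance (riichi_status : List Int) : Decidable (Pre_list_all_possible_tenpai_cases riichi_status) := by unfold Pre_list_all_possible_tenpai_cases; infer_instance
def pvWitness_list_all_possible_tenpai_cases : List Int := [1, 0, 2, 0]

def Spec_list_all_possible_tenpai_cases (riichi_status : List Int) (out : List (Int × Int × Int × Int)) : Prop := out = list_all_possible_tenpai_cases_alt riichi_status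
instance (riichi_status : List Int) (out : List (Int × Int × Int × Int)) : Decidable (Spec_list_all_possible_tenpai_cases riichi_status out) := by unfold Spec_list_all_possible_tenpai_cases; infer_instance

-- ===== CLAIM (what is proved, stated in full; the proofs are below) =====
def Claim_equal_list_all_possible_tenpai_cases : Prop := ∀ (riichi_status : List Int), Dom_list_all_possible_tenpai_cases riichi_status → Pre_list_all_possible_tenpai_cases riichi_status → Spec_list_all_possible_tenpai_cases riichi_status (list_all_possible_tenpai_cases riichi_status)

-- ===== LEMMAS AND PROOFS =====

-- Both programs read only riichi_status[0..3] and only via the test '== 1', so on a list of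
-- length >= 4 both results are determined by the four tests (rs[i] = 1); case-split on them and
-- evaluate both sides.

-- ===== VERDICT (by name: the statement is the Claim_ definition above) =====
theorem list_all_possible_tenpai_cases_spec : Claim_equal_list_all_possible_tenpai_cases := by
  intro rs _hDom hPre
  unfold Pre_list_all_possible_tenpai_cases at hPre
  unfold Spec_list_all_possible_tenpai_cases
  match rs, hPre with
  | a :: b :: c :: d :: t, _ =>
    have R4 : PySem.List.pyRange 0 4 1 = [0, 1, 2, 3] := by decide
    by_cases h0 : a = 1 <;> by_cases h1 : b = 1 <;> by_cases h2 : c = 1 <;> by_cases h3 : d = 1 <;>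
      · simp only [list_all_possible_tenpai_cases, list_all_possible_tenpai_cases_alt, R4,
          List.foldl_cons, List.foldl_nil, List.filter, PySem.List.pyGetD_ofNat', List.getD,
          List.getElem?_cons_zero, List.getElem?_cons_succ]
        simp [h0, h1, h2, h3]
        try decide
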